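-- pv_equiv track=rewrite | github.com/MateuszMagdon/aoc2021 | 3/2.py | count_commons
-- ===== SOURCE A (Python) =====
-- def count_commons(values, index):
--     calc = 0
--
--     for value in values:
--         if value[index] == '1':
--             calc += 1
--         else:
--             calc -= 1
--     return calc
-- ===== SOURCE B (Python) =====
-- def count_commons(values, index):
--     # Divide and conquer: split in half, solve each half recursively, add.
--     # Base cases: empty list scores 0; a single value scores +1 for '1', else -1.
--     n = len(values)
--     if n == 0:
--         return 0
--     if n == 1:
--         return 1 if values[0][index] == '1' else -1
--     mid = n // 2
--     return count_commons(values[:mid], index) + count_commons(values[mid:], index)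
-- ===== Notes on version B (the rewrite author's own statement) =====
-- stated objective: alternative
-- what changed: Replaces A's linear +1/-1 accumulator loop by a divide-and-conquer recursion that splits the list in half, scores each half recursively and adds the two sub-results.
import Mathlib
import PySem

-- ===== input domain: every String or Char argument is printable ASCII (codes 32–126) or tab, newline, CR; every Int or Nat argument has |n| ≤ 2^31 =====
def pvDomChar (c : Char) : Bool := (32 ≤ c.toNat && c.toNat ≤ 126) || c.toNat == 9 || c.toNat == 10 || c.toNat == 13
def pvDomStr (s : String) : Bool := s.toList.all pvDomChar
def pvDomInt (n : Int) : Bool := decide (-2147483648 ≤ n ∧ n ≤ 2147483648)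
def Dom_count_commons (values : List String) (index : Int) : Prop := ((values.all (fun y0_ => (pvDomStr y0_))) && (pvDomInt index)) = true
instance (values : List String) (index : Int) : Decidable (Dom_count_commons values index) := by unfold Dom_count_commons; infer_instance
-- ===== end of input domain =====

-- B replaces A's +1/-1 accumulator loop by a divide-and-conquer recursion on list halves (alternative decomposition).
-- ===== PORT A =====
def count_commons (values : List String) (index : Int) : Int :=
  values.foldl (fun acc value =>
    if PySem.Str.pyGet? value index = some '1' then acc + 1 else acc - 1) 0

-- ===== PORT B =====
def count_commons_alt (values : List String) (index : Int) : Int :=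
  if _h0 : values.length = 0 then 0
  else if _h1 : values.length = 1 then
    match values with
    | v :: _ => if PySem.Str.pyGet? v index = some '1' then 1 else -1
    | [] => 0
  else
    let mid := values.length / 2
    count_commons_alt (PySem.List.slice values none (some (mid : Int))) index +
    count_commons_alt (PySem.List.slice values (some (mid : Int)) none) index
termination_by values.length
decreasing_by
  · rw [PySem.List.slice_to_natCast]; simp [List.length_take]; omega
  · rw [PySem.List.slice_from_natCast]; simp; omega

-- ===== PRECONDITION & SPEC =====
-- Pre_ excludes exactly the inputs where value[index] raises IndexError in the Python programs.
def Pre_count_commons (values : List String) (index : Int) : Prop :=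
  ∀ v ∈ values, PySem.Raise.InRange v.toList.length index
instance (values : List String) (index : Int) : Decidable (Pre_count_commons values index) := by
  unfold Pre_count_commons; infer_instance
def pvWitness_count_commons : List String × Int := (["10", "01", "11"], 1)
def Spec_count_commons (values : List String) (index : Int) (out : Int) : Prop := out = count_commons_alt values index
instance (values : List String) (index : Int) (out : Int) : Decidable (Spec_count_commons values index out) := by unfold Spec_count_commons; infer_instance

-- ===== CLAIM =====
def Claim_equal_count_commons : Prop := ∀ (values : List String) (index : Int), Dom_count_commons values index → Pre_count_commons values index → Spec_count_commons values index (count_commons values index)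

-- ===== LEMMAS AND PROOFS =====
def pvScore (index : Int) (v : String) : Int :=
  if PySem.Str.pyGet? v index = some '1' then 1 else -1

theorem count_commons_foldl (index : Int) (vs : List String) (acc : Int) :
    vs.foldl (fun acc value =>
      if PySem.Str.pyGet? value index = some '1' then acc + 1 else acc - 1) acc
    = acc + (vs.map (pvScore index)).sum := by
  induction vs generalizing acc with
  | nil => simp
  | cons v vs ih =>
    rw [List.foldl_cons, ih, List.map_cons, List.sum_cons]
    unfold pvScore
    by_cases h : PySem.Str.pyGet? v index = some '1'
    · rw [if_pos h, if_pos h]; ring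
    · rw [if_neg h, if_neg h]; ring

theorem count_commons_alt_sum (index : Int) (values : List String) :
    count_commons_alt values index = (values.map (pvScore index)).sum := by
  induction values using count_commons_alt.induct (index := index) with
  | case1 x h0 =>
    have hx : x = [] := List.length_eq_zero_iff.mp h0
    subst hx; rw [count_commons_alt]; simp
  | case2 v tail h0 h1 hget _ _ =>
    have ht : tail = [] := by simpa using h1
    subst ht; rw [count_commons_alt]
    by_cases hc : PySem.Str.pyGet? v index = some '1' <;> simp_all [pvScore]
  | case3 v tail h0 h1 hget _ _ =>
    have ht : tail = [] := by simpa using h1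
    subst ht; rw [count_commons_alt]
    by_cases hc : PySem.Str.pyGet? v index = some '1' <;> simp_all [pvScore]
  | case4 => simp_all
  | case5 x h0 h1 mid ih1 ih2 =>
    rw [count_commons_alt]
    simp only [h0, h1, dite_false]
    rw [ih1, ih2, PySem.List.slice_to_natCast, PySem.List.slice_from_natCast,
        ← List.sum_append, ← List.map_append, List.take_append_drop]

-- ===== VERDICT =====
theorem count_commons_spec : Claim_equal_count_commons := by
  intro values index _ _
  unfold Spec_count_commons count_commons
  rw [count_commons_foldl, count_commons_alt_sum, zero_add]
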